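-- pv_equiv track=rewrite | github.com/Kab0tan/AdventOfCode2023 | day_3.py | splitWithNumericValues
-- ===== SOURCE A (Python) =====
-- from itertools import groupby
--
-- def splitWithNumericValues(s, delimiter):
--     start = 0
--     for key, group in groupby(s, lambda x: x.isnumeric()):
--         g = list(group)
--         end = start + sum(1 for i in g)
--         if key:
--             numeric_value = ''.join(char for char in g)
--             yield start, end, numeric_value
--         start = end
-- ===== SOURCE B (Python) =====
-- def splitWithNumericValues(s, delimiter):
--     n = len(s)
--     i = 0
--     while i < n:
--         if s[i].isnumeric():
--             start = i
--             while i < n and s[i].isnumeric():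
--                 i += 1
--             yield start, i, s[start:i]
--         else:
--             i += 1
-- ===== Notes on version B (the rewrite author's own statement) =====
-- stated objective: idiomatic
-- what changed: Replaces the itertools.groupby pass (which materialises every group, digit or not, and recounts its length) by a manual single index scan that only tracks numeric runs and slices them out directly.
import Mathlib
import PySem

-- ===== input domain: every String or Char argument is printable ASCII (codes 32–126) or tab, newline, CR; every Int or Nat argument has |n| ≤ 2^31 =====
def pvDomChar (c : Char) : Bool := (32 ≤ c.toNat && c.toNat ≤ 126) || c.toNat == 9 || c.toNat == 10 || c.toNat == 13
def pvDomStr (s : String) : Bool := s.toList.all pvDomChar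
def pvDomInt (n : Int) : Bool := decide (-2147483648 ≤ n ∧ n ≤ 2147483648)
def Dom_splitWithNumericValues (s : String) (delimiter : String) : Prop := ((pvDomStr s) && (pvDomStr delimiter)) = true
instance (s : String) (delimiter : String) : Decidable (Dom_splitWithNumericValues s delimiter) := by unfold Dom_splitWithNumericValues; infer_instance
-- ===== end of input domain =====

-- B replaces A's itertools.groupby pass by a manual single index scan; same return values, no speed claim.

-- ===== PORT A =====
-- itertools.groupby(s, key): successive maximal runs of equal key value, as (key, group) pairs.
-- (On the printable-ASCII domain, str.isnumeric is exactly Char.isDigit.)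
def pvGroupby (l : List Char) : List (Bool × List Char) :=
  match l with
  | [] => []
  | c :: rest =>
      let k := c.isDigit
      (k, c :: rest.takeWhile (fun x => x.isDigit == k)) ::
        pvGroupby (rest.dropWhile (fun x => x.isDigit == k))
termination_by l.length
decreasing_by
  simp only [List.length_cons]
  exact Nat.lt_succ_of_le (List.length_dropWhile_le _ _)

-- the for-loop over groupby: state = (yields so far, start)
def splitWithNumericValues (s : String) (delimiter : String) : List (Int × Int × String) :=
  ((pvGroupby s.toList).foldl
    (fun (st : List (Int × Int × String) × Int) kg =>
      let g := kg.2
      let e : Int := st.2 + (g.length : Int)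
      (if kg.1 then st.1 ++ [(st.2, e, String.mk g)] else st.1, e))
    ([], 0)).1

-- ===== PORT B =====
-- inner while: consume the digit run, returning (run, remainder)
def pvTakeRun (l : List Char) : List Char × List Char :=
  match l with
  | [] => ([], [])
  | c :: rest =>
      if c.isDigit then
        let p := pvTakeRun rest
        (c :: p.1, p.2)
      else ([], c :: rest)

theorem pvTakeRun_len (l : List Char) : (pvTakeRun l).2.length ≤ l.length := by
  induction l with
  | nil => simp [pvTakeRun]
  | cons c rest ih =>
      simp only [pvTakeRun]
      split
      · exact Nat.le_succ_of_le ih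
      · simp

-- outer while loop over the index
def pvScanB (l : List Char) (i : Int) : List (Int × Int × String) :=
  match l with
  | [] => []
  | c :: rest =>
      if c.isDigit then
        let p := pvTakeRun rest
        (i, i + 1 + (p.1.length : Int), String.mk (c :: p.1)) ::
          pvScanB p.2 (i + 1 + (p.1.length : Int))
      else pvScanB rest (i + 1)
termination_by l.length
decreasing_by
  · simp only [List.length_cons]
    exact Nat.lt_succ_of_le (pvTakeRun_len rest)
  · simp

def splitWithNumericValues_alt (s : String) (delimiter : String) : List (Int × Int × String) :=
  pvScanB s.toList 0

-- ===== PRECONDITION & SPEC =====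
def Spec_splitWithNumericValues (s : String) (delimiter : String) (out : List (Int × Int × String)) : Prop := out = splitWithNumericValues_alt s delimiter
instance (s : String) (delimiter : String) (out : List (Int × Int × String)) : Decidable (Spec_splitWithNumericValues s delimiter out) := by unfold Spec_splitWithNumericValues; infer_instance

-- ===== CLAIM (what is proved, stated in full; the proofs are below) =====
def Claim_equal_splitWithNumericValues : Prop := ∀ (s : String) (delimiter : String), Dom_splitWithNumericValues s delimiter → Spec_splitWithNumericValues s delimiter (splitWithNumericValues s delimiter)

-- ===== LEMMAS AND PROOFS =====

-- recursive reading of A's foldl loop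
def pvEmit (gs : List (Bool × List Char)) (i : Int) : List (Int × Int × String) :=
  match gs with
  | [] => []
  | (k, g) :: t =>
      (if k then [(i, i + (g.length : Int), String.mk g)] else []) ++ pvEmit t (i + (g.length : Int))

theorem pv_foldl_emit (gs : List (Bool × List Char)) (acc : List (Int × Int × String)) (i : Int) :
    (gs.foldl
      (fun (st : List (Int × Int × String) × Int) kg =>
        let g := kg.2
        let e : Int := st.2 + (g.length : Int)
        (if kg.1 then st.1 ++ [(st.2, e, String.mk g)] else st.1, e))
      (acc, i)).1 = acc ++ pvEmit gs i := by
  induction gs generalizing acc i with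
  | nil => simp [pvEmit]
  | cons kg t ih =>
      obtain ⟨k, g⟩ := kg
      simp only [List.foldl_cons, pvEmit]
      by_cases hk : k
      · simp [hk, ih]
      · simp [hk, ih]

theorem pvTakeRun_eq (l : List Char) :
    pvTakeRun l = (l.takeWhile Char.isDigit, l.dropWhile Char.isDigit) := by
  induction l with
  | nil => simp [pvTakeRun]
  | cons c rest ih =>
      simp only [pvTakeRun, List.takeWhile_cons, List.dropWhile_cons]
      by_cases h : c.isDigit <;> simp [h, ih]

-- scanning a non-digit run just advances the index
theorem pvScanB_nondigit (r : List Char) (t : List Char) (i : Int)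
    (hr : ∀ c ∈ r, c.isDigit = false) :
    pvScanB (r ++ t) i = pvScanB t (i + (r.length : Int)) := by
  induction r generalizing i with
  | nil => simp
  | cons c rest ih =>
      have hc : c.isDigit = false := hr c (by simp)
      rw [List.cons_append, pvScanB, hc]
      simp only [Bool.false_eq_true, if_false]
      rw [ih (i + 1) (fun x hx => hr x (List.mem_cons_of_mem _ hx))]
      congr 1
      simp only [List.length_cons]
      omega

theorem pv_emit_groupby (l : List Char) : ∀ (i : Int),
    pvEmit (pvGroupby l) i = pvScanB l i := by
  induction l using pvGroupby.induct with
  | case1 => intro i; simp [pvGroupby, pvEmit, pvScanB]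
  | case2 c rest k ih =>
      intro i
      rw [pvGroupby, pvEmit, pvScanB]
      by_cases h : c.isDigit
      · have he : (fun x : Char => x.isDigit == true) = Char.isDigit := by
          funext x; simp
        simp only [k, h, if_true, pvTakeRun_eq, List.singleton_append,
          List.length_cons] at ih ⊢
        rw [he] at ih ⊢
        rw [ih]
        have harith : i + (((List.takeWhile Char.isDigit rest).length + 1 : ℕ) : ℤ)
            = i + 1 + ((List.takeWhile Char.isDigit rest).length : ℤ) := by
          push_cast; ring
        rw [harith]
      · have hc : c.isDigit = false := by simpa using h
        have he : (fun x : Char => x.isDigit == false) = (fun x : Char => !x.isDigit) := by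
          funext x; simp
        simp only [k, hc, Bool.false_eq_true, if_false, List.nil_append] at ih ⊢
        rw [he] at ih ⊢
        rw [ih]
        have hsplit : rest = rest.takeWhile (fun x => !x.isDigit)
            ++ rest.dropWhile (fun x => !x.isDigit) := (List.takeWhile_append_dropWhile).symm
        conv_rhs => rw [hsplit]
        rw [pvScanB_nondigit _ _ _ (fun x hx => by
          have := List.mem_takeWhile_imp hx
          simpa using this)]
        congr 1
        simp only [List.length_cons]
        omega

-- ===== VERDICT (by name: the statement is the Claim_ definition above) =====
theorem splitWithNumericValues_spec : Claim_equal_splitWithNumericValues := by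
  intro s delimiter _
  unfold Spec_splitWithNumericValues splitWithNumericValues splitWithNumericValues_alt
  rw [pv_foldl_emit, List.nil_append, pv_emit_groupby]
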